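-- pv_equiv track=rewrite | github.com/KewkLW/pen-audit | pen_audit/scoring.py | classify_screen_tier
-- ===== SOURCE A (Python) =====
-- def classify_screen_tier(feature_counts: dict[str, int]) -> int:
--     """Classify a screen's implementation tier based on detected features.
--
--     Args:
--         feature_counts: dict mapping feature types to counts, e.g.:
--             {"forms": 2, "lists": 1, "charts": 1, "camera": 0, ...}
--
--     Returns:
--         Tier 1-4
--     """
--     # T4 indicators: device APIs, real-time, animations
--     t4_indicators = ["camera", "scanner", "map", "video", "realtime", "animation", "device_api"]
--     if any(feature_counts.get(ind, 0) > 0 for ind in t4_indicators):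
--         return 4
--
--     # T3 indicators: complex interactivity
--     t3_indicators = ["charts", "timers", "builders", "drag_drop", "swipe", "tabs_complex"]
--     if any(feature_counts.get(ind, 0) > 0 for ind in t3_indicators):
--         return 3
--
--     # T2 indicators: CRUD, forms, data display
--     t2_indicators = ["forms", "lists", "cards", "crud", "detail_view", "modals", "tabs"]
--     if any(feature_counts.get(ind, 0) > 0 for ind in t2_indicators):
--         return 2
--
--     # T1: static content only
--     return 1
-- ===== SOURCE B (Python) =====
-- TIER = {
--     "camera": 4, "scanner": 4, "map": 4, "video": 4, "realtime": 4,
--     "animation": 4, "device_api": 4,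
--     "charts": 3, "timers": 3, "builders": 3, "drag_drop": 3, "swipe": 3,
--     "tabs_complex": 3,
--     "forms": 2, "lists": 2, "cards": 2, "crud": 2, "detail_view": 2,
--     "modals": 2, "tabs": 2,
-- }
--
--
-- def classify_screen_tier(feature_counts: dict[str, int]) -> int:
--     """Classify a screen's implementation tier based on detected features."""
--     best = 1
--     for key, count in feature_counts.items():
--         if count > 0:
--             t = TIER.get(key, 1)
--             if t > best:
--                 best = t
--     return best
-- ===== Notes on version B (the rewrite author's own statement) =====
-- stated objective: simpler
-- what changed: Replaces three ordered any-scans over fixed indicator lists (with dict.get per indicator) by a single pass over feature_counts.items() that looks each key up in one precomputed key->tier table and keeps the maximum tier seen.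
import Mathlib
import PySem

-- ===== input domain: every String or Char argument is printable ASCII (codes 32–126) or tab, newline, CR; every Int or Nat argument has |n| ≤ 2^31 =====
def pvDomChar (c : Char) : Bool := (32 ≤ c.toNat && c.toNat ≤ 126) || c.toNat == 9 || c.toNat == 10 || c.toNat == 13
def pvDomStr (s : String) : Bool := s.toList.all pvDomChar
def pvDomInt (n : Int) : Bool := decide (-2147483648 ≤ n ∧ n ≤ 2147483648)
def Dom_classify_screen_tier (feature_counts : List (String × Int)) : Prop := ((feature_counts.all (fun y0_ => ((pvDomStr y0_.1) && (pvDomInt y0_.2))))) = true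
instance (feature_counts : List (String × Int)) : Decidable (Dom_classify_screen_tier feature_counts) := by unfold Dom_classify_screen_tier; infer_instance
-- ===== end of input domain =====

-- B replaces A's three ordered any-scans over fixed indicator lists by one pass over the
-- input items through a precomputed key→tier table, tracking the maximum tier (objective: simpler).

-- ===== PORT A =====
def pvT4ind : List String := ["camera", "scanner", "map", "video", "realtime", "animation", "device_api"]
def pvT3ind : List String := ["charts", "timers", "builders", "drag_drop", "swipe", "tabs_complex"]
def pvT2ind : List String := ["forms", "lists", "cards", "crud", "detail_view", "modals", "tabs"]

def classify_screen_tier (feature_counts : List (String × Int)) : Int :=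
  let d := PySem.Dict.mk feature_counts
  if pvT4ind.any (fun ind => decide (d.getD ind 0 > 0)) then 4
  else if pvT3ind.any (fun ind => decide (d.getD ind 0 > 0)) then 3
  else if pvT2ind.any (fun ind => decide (d.getD ind 0 > 0)) then 2
  else 1

-- ===== PORT B =====
def pvTIER : PySem.Dict String Int := PySem.Dict.mk
  [("camera", 4), ("scanner", 4), ("map", 4), ("video", 4), ("realtime", 4),
   ("animation", 4), ("device_api", 4),
   ("charts", 3), ("timers", 3), ("builders", 3), ("drag_drop", 3), ("swipe", 3),
   ("tabs_complex", 3),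
   ("forms", 2), ("lists", 2), ("cards", 2), ("crud", 2), ("detail_view", 2),
   ("modals", 2), ("tabs", 2)]

def classify_screen_tier_alt (feature_counts : List (String × Int)) : Int :=
  feature_counts.foldl
    (fun best p =>
      if p.2 > 0 then
        let t := pvTIER.getD p.1 1
        if t > best then t else best
      else best)
    1

-- ===== PRECONDITION & SPEC =====
-- Pre_ requires distinct keys: the argument models a Python dict, whose keys are always
-- distinct; on a duplicate-key association list A reads only the first binding of each key
-- while B reads all of them, and neither behaviour corresponds to any Python input.
def Pre_classify_screen_tier (feature_counts : List (String × Int)) : Prop :=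
  (feature_counts.map Prod.fst).Nodup
instance (feature_counts : List (String × Int)) : Decidable (Pre_classify_screen_tier feature_counts) := by unfold Pre_classify_screen_tier; infer_instance

def pvWitness_classify_screen_tier : (List (String × Int)) := [("forms", 2), ("camera", 0)]

def Spec_classify_screen_tier (feature_counts : List (String × Int)) (out : Int) : Prop := out = classify_screen_tier_alt feature_counts
instance (feature_counts : List (String × Int)) (out : Int) : Decidable (Spec_classify_screen_tier feature_counts out) := by unfold Spec_classify_screen_tier; infer_instance

-- ===== CLAIM (what is proved, stated in full; the proofs are below) =====
def Claim_equal_classify_screen_tier : Prop := ∀ (feature_counts : List (String × Int)), Dom_classify_screen_tier feature_counts → Pre_classify_screen_tier feature_counts → Spec_classify_screen_tier feature_counts (classify_screen_tier feature_counts)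

-- ===== LEMMAS AND PROOFS =====

-- getD on a literal association-list dict, unfolded one binding at a time
theorem getD_mk_cons {κ ν : Type} [BEq κ] (a : κ) (b : ν) (rest : List (κ × ν)) (x : κ) (d : ν) :
    (PySem.Dict.mk ((a, b) :: rest)).getD x d = if a == x then b else (PySem.Dict.mk rest).getD x d := by
  simp [PySem.Dict.getD_eq_get?_getD, PySem.Dict.get?_mk_cons]
  split <;> rfl

theorem getD_mk_nil {κ ν : Type} [BEq κ] (x : κ) (d : ν) :
    (PySem.Dict.mk ([] : List (κ × ν))).getD x d = d := rfl

-- the tier table read off as a function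
def pvTier (k : String) : Int := pvTIER.getD k 1

theorem pvTier_eq_four (k : String) : pvTier k = 4 ↔ k ∈ pvT4ind := by
  by_cases h0 : "camera" = k
  · subst h0; decide
  by_cases h1 : "scanner" = k
  · subst h1; decide
  by_cases h2 : "map" = k
  · subst h2; decide
  by_cases h3 : "video" = k
  · subst h3; decide
  by_cases h4 : "realtime" = k
  · subst h4; decide
  by_cases h5 : "animation" = k
  · subst h5; decide
  by_cases h6 : "device_api" = k
  · subst h6; decide
  by_cases h7 : "charts" = k
  · subst h7; decide
  by_cases h8 : "timers" = k
  · subst h8; decide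
  by_cases h9 : "builders" = k
  · subst h9; decide
  by_cases h10 : "drag_drop" = k
  · subst h10; decide
  by_cases h11 : "swipe" = k
  · subst h11; decide
  by_cases h12 : "tabs_complex" = k
  · subst h12; decide
  by_cases h13 : "forms" = k
  · subst h13; decide
  by_cases h14 : "lists" = k
  · subst h14; decide
  by_cases h15 : "cards" = k
  · subst h15; decide
  by_cases h16 : "crud" = k
  · subst h16; decide
  by_cases h17 : "detail_view" = k
  · subst h17; decide
  by_cases h18 : "modals" = k
  · subst h18; decide
  by_cases h19 : "tabs" = k
  · subst h19; decide
  simp only [pvTier, pvTIER, pvT4ind, getD_mk_cons, getD_mk_nil, beq_iff_eq]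
  rw [if_neg h0, if_neg h1, if_neg h2, if_neg h3, if_neg h4, if_neg h5, if_neg h6, if_neg h7, if_neg h8, if_neg h9, if_neg h10, if_neg h11, if_neg h12, if_neg h13, if_neg h14, if_neg h15, if_neg h16, if_neg h17, if_neg h18, if_neg h19]
  refine iff_of_false (by decide) ?_
  intro hm
  simp only [List.mem_cons, List.not_mem_nil, or_false] at hm
  rcases hm with rfl|rfl|rfl|rfl|rfl|rfl|rfl <;> simp_all

theorem pvTier_eq_three (k : String) : pvTier k = 3 ↔ k ∈ pvT3ind := by
  by_cases h0 : "camera" = k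
  · subst h0; decide
  by_cases h1 : "scanner" = k
  · subst h1; decide
  by_cases h2 : "map" = k
  · subst h2; decide
  by_cases h3 : "video" = k
  · subst h3; decide
  by_cases h4 : "realtime" = k
  · subst h4; decide
  by_cases h5 : "animation" = k
  · subst h5; decide
  by_cases h6 : "device_api" = k
  · subst h6; decide
  by_cases h7 : "charts" = k
  · subst h7; decide
  by_cases h8 : "timers" = k
  · subst h8; decide
  by_cases h9 : "builders" = k
  · subst h9; decide
  by_cases h10 : "drag_drop" = k
  · subst h10; decide
  by_cases h11 : "swipe" = k
  · subst h11; decide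
  by_cases h12 : "tabs_complex" = k
  · subst h12; decide
  by_cases h13 : "forms" = k
  · subst h13; decide
  by_cases h14 : "lists" = k
  · subst h14; decide
  by_cases h15 : "cards" = k
  · subst h15; decide
  by_cases h16 : "crud" = k
  · subst h16; decide
  by_cases h17 : "detail_view" = k
  · subst h17; decide
  by_cases h18 : "modals" = k
  · subst h18; decide
  by_cases h19 : "tabs" = k
  · subst h19; decide
  simp only [pvTier, pvTIER, pvT3ind, getD_mk_cons, getD_mk_nil, beq_iff_eq]
  rw [if_neg h0, if_neg h1, if_neg h2, if_neg h3, if_neg h4, if_neg h5, if_neg h6, if_neg h7, if_neg h8, if_neg h9, if_neg h10, if_neg h11, if_neg h12, if_neg h13, if_neg h14, if_neg h15, if_neg h16, if_neg h17, if_neg h18, if_neg h19]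
  refine iff_of_false (by decide) ?_
  intro hm
  simp only [List.mem_cons, List.not_mem_nil, or_false] at hm
  rcases hm with rfl|rfl|rfl|rfl|rfl|rfl <;> simp_all

theorem pvTier_eq_two (k : String) : pvTier k = 2 ↔ k ∈ pvT2ind := by
  by_cases h0 : "camera" = k
  · subst h0; decide
  by_cases h1 : "scanner" = k
  · subst h1; decide
  by_cases h2 : "map" = k
  · subst h2; decide
  by_cases h3 : "video" = k
  · subst h3; decide
  by_cases h4 : "realtime" = k
  · subst h4; decide
  by_cases h5 : "animation" = k
  · subst h5; decide
  by_cases h6 : "device_api" = k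
  · subst h6; decide
  by_cases h7 : "charts" = k
  · subst h7; decide
  by_cases h8 : "timers" = k
  · subst h8; decide
  by_cases h9 : "builders" = k
  · subst h9; decide
  by_cases h10 : "drag_drop" = k
  · subst h10; decide
  by_cases h11 : "swipe" = k
  · subst h11; decide
  by_cases h12 : "tabs_complex" = k
  · subst h12; decide
  by_cases h13 : "forms" = k
  · subst h13; decide
  by_cases h14 : "lists" = k
  · subst h14; decide
  by_cases h15 : "cards" = k
  · subst h15; decide
  by_cases h16 : "crud" = k
  · subst h16; decide
  by_cases h17 : "detail_view" = k
  · subst h17; decide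
  by_cases h18 : "modals" = k
  · subst h18; decide
  by_cases h19 : "tabs" = k
  · subst h19; decide
  simp only [pvTier, pvTIER, pvT2ind, getD_mk_cons, getD_mk_nil, beq_iff_eq]
  rw [if_neg h0, if_neg h1, if_neg h2, if_neg h3, if_neg h4, if_neg h5, if_neg h6, if_neg h7, if_neg h8, if_neg h9, if_neg h10, if_neg h11, if_neg h12, if_neg h13, if_neg h14, if_neg h15, if_neg h16, if_neg h17, if_neg h18, if_neg h19]
  refine iff_of_false (by decide) ?_
  intro hm
  simp only [List.mem_cons, List.not_mem_nil, or_false] at hm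
  rcases hm with rfl|rfl|rfl|rfl|rfl|rfl|rfl <;> simp_all

theorem pvTier_cases (k : String) :
    pvTier k = 1 ∨ pvTier k = 2 ∨ pvTier k = 3 ∨ pvTier k = 4 := by
  by_cases h0 : "camera" = k
  · subst h0; decide
  by_cases h1 : "scanner" = k
  · subst h1; decide
  by_cases h2 : "map" = k
  · subst h2; decide
  by_cases h3 : "video" = k
  · subst h3; decide
  by_cases h4 : "realtime" = k
  · subst h4; decide
  by_cases h5 : "animation" = k
  · subst h5; decide
  by_cases h6 : "device_api" = k
  · subst h6; decide
  by_cases h7 : "charts" = k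
  · subst h7; decide
  by_cases h8 : "timers" = k
  · subst h8; decide
  by_cases h9 : "builders" = k
  · subst h9; decide
  by_cases h10 : "drag_drop" = k
  · subst h10; decide
  by_cases h11 : "swipe" = k
  · subst h11; decide
  by_cases h12 : "tabs_complex" = k
  · subst h12; decide
  by_cases h13 : "forms" = k
  · subst h13; decide
  by_cases h14 : "lists" = k
  · subst h14; decide
  by_cases h15 : "cards" = k
  · subst h15; decide
  by_cases h16 : "crud" = k
  · subst h16; decide
  by_cases h17 : "detail_view" = k
  · subst h17; decide
  by_cases h18 : "modals" = k
  · subst h18; decide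
  by_cases h19 : "tabs" = k
  · subst h19; decide
  simp only [pvTier, pvTIER, getD_mk_cons, getD_mk_nil, beq_iff_eq]
  rw [if_neg h0, if_neg h1, if_neg h2, if_neg h3, if_neg h4, if_neg h5, if_neg h6, if_neg h7, if_neg h8, if_neg h9, if_neg h10, if_neg h11, if_neg h12, if_neg h13, if_neg h14, if_neg h15, if_neg h16, if_neg h17, if_neg h18, if_neg h19]
  norm_num

-- the priority-scan normal form both programs compute
def pvActiveb (fc : List (String × Int)) (t : Int) : Bool :=
  fc.any (fun p => decide (p.2 > 0) && (pvTier p.1 == t))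

def pvNorm (fc : List (String × Int)) : Int :=
  if pvActiveb fc 4 then 4 else if pvActiveb fc 3 then 3 else if pvActiveb fc 2 then 2 else 1

theorem pvActiveb_iff (fc : List (String × Int)) (t : Int) :
    pvActiveb fc t = true ↔ ∃ p ∈ fc, p.2 > 0 ∧ pvTier p.1 = t := by
  simp [pvActiveb, List.any_eq_true]

theorem pvActiveb_cons (p : String × Int) (l : List (String × Int)) (t : Int) :
    pvActiveb (p :: l) t = ((decide (p.2 > 0) && (pvTier p.1 == t)) || pvActiveb l t) := by
  simp [pvActiveb]

theorem pvNorm_bounds (fc : List (String × Int)) : 1 ≤ pvNorm fc ∧ pvNorm fc ≤ 4 := by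
  unfold pvNorm; split_ifs <;> norm_num

-- B's loop body
def pvStep (best : Int) (p : String × Int) : Int :=
  if p.2 > 0 then
    if pvTIER.getD p.1 1 > best then pvTIER.getD p.1 1 else best
  else best

theorem pvStep_eq_max (best : Int) (p : String × Int) :
    pvStep best p = if p.2 > 0 then max best (pvTier p.1) else best := by
  unfold pvStep pvTier
  split_ifs <;> omega

theorem foldl_pvStep_max (l : List (String × Int)) (b c : Int) :
    l.foldl pvStep (max b c) = max b (l.foldl pvStep c) := by
  induction l generalizing b c with
  | nil => simp
  | cons p l ih =>
    simp only [List.foldl_cons]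
    have h : pvStep (max b c) p = max b (pvStep c p) := by
      simp only [pvStep_eq_max]; split_ifs <;> omega
    rw [h, ih]

-- a positive count extends the normal form by one max; a non-positive one leaves it alone
theorem pvNorm_cons_pos (p : String × Int) (l : List (String × Int)) (hp : p.2 > 0) :
    pvNorm (p :: l) = max (pvTier p.1) (pvNorm l) := by
  rcases pvTier_cases p.1 with ht | ht | ht | ht <;>
    · unfold pvNorm
      simp only [pvActiveb_cons, ht, hp, decide_true, Bool.true_and]
      norm_num
      split_ifs <;> norm_num [max_def]

theorem pvNorm_cons_neg (p : String × Int) (l : List (String × Int)) (hp : ¬p.2 > 0) :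
    pvNorm (p :: l) = pvNorm l := by
  unfold pvNorm
  simp only [pvActiveb_cons, hp, decide_false, Bool.false_and, Bool.false_or]

theorem foldl_pvStep_norm (l : List (String × Int)) : l.foldl pvStep 1 = pvNorm l := by
  induction l with
  | nil => simp [pvNorm, pvActiveb]
  | cons p l ih =>
    have hge : 1 ≤ pvStep 1 p := by simp only [pvStep_eq_max]; split_ifs <;> omega
    have h1 : pvStep 1 p = max (pvStep 1 p) 1 := by omega
    rw [List.foldl_cons, h1, foldl_pvStep_max, ih]
    obtain ⟨hb1, hb2⟩ := pvNorm_bounds l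
    by_cases hp : p.2 > 0
    · rw [pvNorm_cons_pos p l hp]
      have hstep : pvStep 1 p = max 1 (pvTier p.1) := by simp [pvStep_eq_max, hp]
      rw [hstep]
      rcases pvTier_cases p.1 with ht | ht | ht | ht <;> rw [ht] <;>
        simp only [max_def] <;> split_ifs <;> omega
    · rw [pvNorm_cons_neg p l hp]
      have hstep : pvStep 1 p = 1 := by simp [pvStep_eq_max, hp]
      rw [hstep]
      omega

theorem alt_eq_norm (fc : List (String × Int)) :
    classify_screen_tier_alt fc = pvNorm fc := by
  have h : classify_screen_tier_alt fc = fc.foldl pvStep 1 := rfl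
  rw [h, foldl_pvStep_norm]

-- A's membership scans, with distinct keys, test exactly the active-tier predicate
theorem anyGetD_iff (fc : List (String × Int)) (h : (fc.map Prod.fst).Nodup) (L : List String) :
    (L.any fun ind => decide ((PySem.Dict.mk fc).getD ind 0 > 0)) = true ↔
      ∃ p ∈ fc, p.1 ∈ L ∧ p.2 > 0 := by
  rw [List.any_eq_true]
  constructor
  · rintro ⟨ind, hind, hgt⟩
    rw [decide_eq_true_eq] at hgt
    cases hq : (PySem.Dict.mk fc).get? ind with
    | none => rw [PySem.Dict.getD_of_get?_eq_none _ _ hq] at hgt; omega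
    | some v =>
      have hm := PySem.Dict.mem_items_of_get?_eq_some _ hq
      refine ⟨(ind, v), hm, hind, ?_⟩
      have := PySem.Dict.getD_of_get?_eq_some (PySem.Dict.mk fc) 0 hq
      rw [this] at hgt
      exact hgt
  · rintro ⟨⟨k, v⟩, hm, hk, hv⟩
    refine ⟨k, hk, ?_⟩
    rw [decide_eq_true_eq]
    rw [PySem.Dict.getD_of_mem_items _ hm h 0]
    exact hv

theorem activeb_iff_mem (fc : List (String × Int)) (t : Int) (L : List String)
    (hL : ∀ k, pvTier k = t ↔ k ∈ L) :
    pvActiveb fc t = true ↔ ∃ p ∈ fc, p.1 ∈ L ∧ p.2 > 0 := by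
  rw [pvActiveb_iff]
  constructor
  · rintro ⟨p, hp, h1, h2⟩; exact ⟨p, hp, (hL p.1).mp h2, h1⟩
  · rintro ⟨p, hp, h1, h2⟩; exact ⟨p, hp, h2, (hL p.1).mpr h1⟩

theorem a_eq_norm (fc : List (String × Int)) (h : (fc.map Prod.fst).Nodup) :
    classify_screen_tier fc = pvNorm fc := by
  have h4 : (pvT4ind.any fun ind => decide ((PySem.Dict.mk fc).getD ind 0 > 0)) = pvActiveb fc 4 := by
    rw [Bool.eq_iff_iff, anyGetD_iff fc h, activeb_iff_mem fc 4 pvT4ind pvTier_eq_four]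
  have h3 : (pvT3ind.any fun ind => decide ((PySem.Dict.mk fc).getD ind 0 > 0)) = pvActiveb fc 3 := by
    rw [Bool.eq_iff_iff, anyGetD_iff fc h, activeb_iff_mem fc 3 pvT3ind pvTier_eq_three]
  have h2 : (pvT2ind.any fun ind => decide ((PySem.Dict.mk fc).getD ind 0 > 0)) = pvActiveb fc 2 := by
    rw [Bool.eq_iff_iff, anyGetD_iff fc h, activeb_iff_mem fc 2 pvT2ind pvTier_eq_two]
  show (if pvT4ind.any (fun ind => decide ((PySem.Dict.mk fc).getD ind 0 > 0)) then (4 : Int)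
    else if pvT3ind.any (fun ind => decide ((PySem.Dict.mk fc).getD ind 0 > 0)) then 3
    else if pvT2ind.any (fun ind => decide ((PySem.Dict.mk fc).getD ind 0 > 0)) then 2
    else 1) = pvNorm fc
  rw [h4, h3, h2, pvNorm]

-- ===== VERDICT (by name: the statement is the Claim_ definition above) =====
theorem classify_screen_tier_spec : Claim_equal_classify_screen_tier := by
  intro fc _ hpre
  unfold Spec_classify_screen_tier
  rw [alt_eq_norm, a_eq_norm fc hpre]
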